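-- pv_equiv track=rewrite | github.com/dwqRP/Piccolo | code/key_recovery.py | F
-- ===== SOURCE A (Python) =====
-- S = [0xE, 0x4, 0xB, 0x2, 0x3, 0x8, 0x0, 0x9, 0x1, 0xA, 0x7, 0xF, 0x6, 0xC, 0x5, 0xD]
--
-- def lhalf(x, b=8):
--     return x >> b
--
-- def rhalf(x, b=8):
--     return x % (1 << b)
--
-- def cat(x, y, b=8):
--     return (x << b) | y
--
-- def F(x):
--     l, r = lhalf(x), rhalf(x)
--     t = [lhalf(l, 4), rhalf(l, 4), lhalf(r, 4), rhalf(r, 4)]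
--     for i in range(4):
--         t[i] = S[t[i]]
--     z = []
--     z.append(mul(2, t[0]) ^ mul(3, t[1]) ^ t[2] ^ t[3])
--     z.append(mul(2, t[1]) ^ mul(3, t[2]) ^ t[0] ^ t[3])
--     z.append(mul(2, t[2]) ^ mul(3, t[3]) ^ t[0] ^ t[1])
--     z.append(mul(2, t[3]) ^ mul(3, t[0]) ^ t[1] ^ t[2])
--     for i in range(4):
--         z[i] = S[z[i]]
--     return cat(cat(z[0], z[1], 4), cat(z[2], z[3], 4), 8)
--
-- def mul(x, y):
--     ans = 0
--     p = 0b10011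
--     for i in range(4):
--         if x & (1 << i):
--             ans ^= y << i
--     for i in range(7, 3, -1):
--         if ans & (1 << i):
--             ans ^= p << (i - 4)
--     return ans
-- ===== SOURCE B (Python) =====
-- # B: same S-box pipeline, but GF(2^4) products come from a generator/antilog table
-- # (a*b = EXP[(log a + log b) % 15]) and MixColumns is one matrix-indexed fold.
-- S = [0xE, 0x4, 0xB, 0x2, 0x3, 0x8, 0x0, 0x9, 0x1, 0xA, 0x7, 0xF, 0x6, 0xC, 0x5, 0xD]
--
-- # powers of the generator 2 in GF(2^4) with reduction x^4 + x + 1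
-- EXP = [1]
-- v = 1
-- for _ in range(14):
--     v <<= 1
--     if v & 16:
--         v ^= 19
--     EXP.append(v)
--
-- M = ((2, 3, 1, 1), (1, 2, 3, 1), (1, 1, 2, 3), (3, 1, 1, 2))
--
-- def gmul(a, b):
--     if a == 0 or b == 0:
--         return 0
--     return EXP[(EXP.index(a) + EXP.index(b)) % 15]
--
-- def F(x):
--     t = [S[(x >> sh) % 16] for sh in (12, 8, 4, 0)]
--     z = []
--     for row in M:
--         acc = 0
--         for c, v in zip(row, t):
--             acc ^= gmul(c, v)
--         z.append(S[acc])
--     return (z[0] << 12) | (z[1] << 8) | (z[2] << 4) | z[3]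
-- ===== Notes on version B (the rewrite author's own statement) =====
-- stated objective: alternative
-- what changed: GF(2^4) multiplication is computed via a generated antilog table and discrete logs (EXP[(log a + log b) % 15]) instead of shift-and-add with polynomial reduction loops, and MixColumns becomes a single matrix-indexed fold over the rows of the circulant matrix instead of four hand-written XOR expressions.
-- crash fix: For x outside [-65536, 65536) A raises IndexError on the first S-box lookup (x >> 12 out of list range); B masks each nibble with % 16 and returns F of x mod 2^16 (21845 at x = 65536). — e.g. on F(65536): A raises IndexError, B returns 21845
import Mathlib
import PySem

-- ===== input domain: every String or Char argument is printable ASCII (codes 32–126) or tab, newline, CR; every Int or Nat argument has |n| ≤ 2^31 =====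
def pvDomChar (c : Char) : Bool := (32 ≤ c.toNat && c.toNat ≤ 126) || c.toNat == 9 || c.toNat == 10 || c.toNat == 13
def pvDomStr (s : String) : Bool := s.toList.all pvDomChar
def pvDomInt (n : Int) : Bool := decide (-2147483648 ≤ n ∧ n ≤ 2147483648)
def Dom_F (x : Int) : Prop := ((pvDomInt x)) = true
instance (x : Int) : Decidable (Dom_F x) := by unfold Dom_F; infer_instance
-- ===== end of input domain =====

-- B replaces the shift-and-reduce GF(2^4) multiplication by a generator/antilog table
-- (product = EXP[(log a + log b) % 15]) and folds MixColumns over an explicit matrix (objective: alternative).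

-- ===== PORT A =====
def sboxA : List Int := [14, 4, 11, 2, 3, 8, 0, 9, 1, 10, 7, 15, 6, 12, 5, 13]

def lhalfA (x : Int) (b : Nat) : Int := x >>> b
def rhalfA (x : Int) (b : Nat) : Int := PySem.Int.mod x ((1:Int) <<< b)
def catA (x y : Int) (b : Nat) : Int := PySem.Int.bor (x <<< b) y

-- mul: two for-loops (range(4) and range(7,3,-1), concrete index lists)
def mulA (x y : Int) : Int :=
  let ans := ([0, 1, 2, 3] : List Nat).foldl
    (fun ans i => if PySem.Int.band x (1 <<< i) ≠ 0 then PySem.Int.bxor ans (y <<< i) else ans) 0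
  ([7, 6, 5, 4] : List Nat).foldl
    (fun ans i => if PySem.Int.band ans (1 <<< i) ≠ 0 then PySem.Int.bxor ans (19 <<< (i - 4)) else ans) ans

-- S[t[i]] : pyGet? (none = IndexError, excluded by Pre_F); straight-line lets for the list updates
def F (x : Int) : Int :=
  let l := lhalfA x 8
  let r := rhalfA x 8
  let t0 := (PySem.List.pyGet? sboxA (lhalfA l 4)).getD 0
  let t1 := (PySem.List.pyGet? sboxA (rhalfA l 4)).getD 0
  let t2 := (PySem.List.pyGet? sboxA (lhalfA r 4)).getD 0
  let t3 := (PySem.List.pyGet? sboxA (rhalfA r 4)).getD 0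
  let z0 := PySem.Int.bxor (PySem.Int.bxor (PySem.Int.bxor (mulA 2 t0) (mulA 3 t1)) t2) t3
  let z1 := PySem.Int.bxor (PySem.Int.bxor (PySem.Int.bxor (mulA 2 t1) (mulA 3 t2)) t0) t3
  let z2 := PySem.Int.bxor (PySem.Int.bxor (PySem.Int.bxor (mulA 2 t2) (mulA 3 t3)) t0) t1
  let z3 := PySem.Int.bxor (PySem.Int.bxor (PySem.Int.bxor (mulA 2 t3) (mulA 3 t0)) t1) t2
  let w0 := (PySem.List.pyGet? sboxA z0).getD 0
  let w1 := (PySem.List.pyGet? sboxA z1).getD 0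
  let w2 := (PySem.List.pyGet? sboxA z2).getD 0
  let w3 := (PySem.List.pyGet? sboxA z3).getD 0
  catA (catA w0 w1 4) (catA w2 w3 4) 8

-- ===== PORT B =====
def sboxB : List Int := [14, 4, 11, 2, 3, 8, 0, 9, 1, 10, 7, 15, 6, 12, 5, 13]

-- EXP table generation loop: state = (list so far, current power v)
def expB : List Int :=
  ((List.range 14).foldl
    (fun (st : List Int × Int) _ =>
      let v := st.2 <<< 1
      let v := if PySem.Int.band v 16 ≠ 0 then PySem.Int.bxor v 19 else v
      (st.1 ++ [v], v))
    ([1], 1)).1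

def mrowsB : List (List Int) := [[2, 3, 1, 1], [1, 2, 3, 1], [1, 1, 2, 3], [3, 1, 1, 2]]

def gmulB (a b : Int) : Int :=
  if a = 0 ∨ b = 0 then 0
  else (PySem.List.pyGet? expB
    (((((PySem.List.index? expB a).getD 0 + (PySem.List.index? expB b).getD 0) % 15 : Nat) : Int))).getD 0

def F_alt (x : Int) : Int :=
  let t := [12, 8, 4, 0].map
    (fun (sh : Nat) => (PySem.List.pyGet? sboxB (PySem.Int.mod (x >>> sh) 16)).getD 0)
  let z := mrowsB.map (fun row =>
    let acc := (row.zip t).foldl (fun acc cv => PySem.Int.bxor acc (gmulB cv.1 cv.2)) 0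
    (PySem.List.pyGet? sboxB acc).getD 0)
  PySem.Int.bor (PySem.Int.bor (PySem.Int.bor (z.getD 0 0 <<< (12:Nat)) (z.getD 1 0 <<< (8:Nat))) (z.getD 2 0 <<< (4:Nat))) (z.getD 3 0)

-- ===== PRECONDITION & SPEC =====
-- Pre_F: exactly the inputs where A's S-box indexing does not raise IndexError (x >> 12 must be in [-16,16)).
def Pre_F (x : Int) : Prop := -65536 ≤ x ∧ x < 65536
instance (x : Int) : Decidable (Pre_F x) := by unfold Pre_F; infer_instance

def pvWitness_F : Int := 4660

-- On |x| beyond the 16-bit range A raises IndexError on the first S-box lookup; B returns the value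
-- of F on x mod 2^16 (theorem F_raises at the bottom).
def Raises_F (x : Int) : Prop := x < -65536 ∨ 65536 ≤ x
instance (x : Int) : Decidable (Raises_F x) := by unfold Raises_F; infer_instance
def pvRaiseWitness_F : Int := 65536
def pvRaiseWitnessOut_F : Int := 21845

def Spec_F (x : Int) (out : Int) : Prop := out = F_alt x
instance (x : Int) (out : Int) : Decidable (Spec_F x out) := by unfold Spec_F; infer_instance

-- ===== CLAIM (what is proved, stated in full; the proofs are below) =====
def Claim_equal_F : Prop := ∀ (x : Int), Dom_F x → Pre_F x → Spec_F x (F x)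
def Claim_raises_F : Prop := (∀ (x : Int), Dom_F x → Raises_F x → ¬ Pre_F x) ∧ (Dom_F (pvRaiseWitness_F) ∧ Raises_F (pvRaiseWitness_F) ∧ F_alt (pvRaiseWitness_F) = pvRaiseWitnessOut_F)

-- ===== LEMMAS AND PROOFS =====

-- the tail of F after the first S-box layer, as a function of the four looked-up values
def coreA (a b c d : Int) : Int :=
  let z0 := PySem.Int.bxor (PySem.Int.bxor (PySem.Int.bxor (mulA 2 a) (mulA 3 b)) c) d
  let z1 := PySem.Int.bxor (PySem.Int.bxor (PySem.Int.bxor (mulA 2 b) (mulA 3 c)) a) d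
  let z2 := PySem.Int.bxor (PySem.Int.bxor (PySem.Int.bxor (mulA 2 c) (mulA 3 d)) a) b
  let z3 := PySem.Int.bxor (PySem.Int.bxor (PySem.Int.bxor (mulA 2 d) (mulA 3 a)) b) c
  let w0 := (PySem.List.pyGet? sboxA z0).getD 0
  let w1 := (PySem.List.pyGet? sboxA z1).getD 0
  let w2 := (PySem.List.pyGet? sboxA z2).getD 0
  let w3 := (PySem.List.pyGet? sboxA z3).getD 0
  catA (catA w0 w1 4) (catA w2 w3 4) 8

-- the tail of F_alt on the already looked-up nibble list [a,b,c,d]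
def coreB (a b c d : Int) : Int :=
  let z := mrowsB.map (fun row =>
    let acc := (row.zip [a, b, c, d]).foldl (fun acc cv => PySem.Int.bxor acc (gmulB cv.1 cv.2)) 0
    (PySem.List.pyGet? sboxB acc).getD 0)
  PySem.Int.bor (PySem.Int.bor (PySem.Int.bor (z.getD 0 0 <<< (12:Nat)) (z.getD 1 0 <<< (8:Nat))) (z.getD 2 0 <<< (4:Nat))) (z.getD 3 0)

lemma F_eq_coreA (x : Int) :
    F x = coreA ((PySem.List.pyGet? sboxA (lhalfA (lhalfA x 8) 4)).getD 0)
               ((PySem.List.pyGet? sboxA (rhalfA (lhalfA x 8) 4)).getD 0)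
               ((PySem.List.pyGet? sboxA (lhalfA (rhalfA x 8) 4)).getD 0)
               ((PySem.List.pyGet? sboxA (rhalfA (rhalfA x 8) 4)).getD 0) := by
  simp only [F, coreA]

lemma Falt_eq_coreB (x : Int) :
    F_alt x = coreB ((PySem.List.pyGet? sboxB (PySem.Int.mod (x >>> (12:Nat)) 16)).getD 0)
                    ((PySem.List.pyGet? sboxB (PySem.Int.mod (x >>> (8:Nat)) 16)).getD 0)
                    ((PySem.List.pyGet? sboxB (PySem.Int.mod (x >>> (4:Nat)) 16)).getD 0)
                    ((PySem.List.pyGet? sboxB (PySem.Int.mod (x >>> (0:Nat)) 16)).getD 0) := by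
  simp only [F_alt, coreB, List.map_cons, List.map_nil]

lemma wrap_lookup (i : Int) (h1 : -16 ≤ i) (h2 : i < 16) :
    PySem.List.pyGet? sboxA i = PySem.List.pyGet? sboxA (PySem.Int.mod i 16) := by
  interval_cases i <;> rfl

lemma g1 : ∀ v : Fin 16, gmulB 1 ((v:Nat):Int) = ((v:Nat):Int) := by decide
lemma g2 : ∀ v : Fin 16, gmulB 2 ((v:Nat):Int) = mulA 2 ((v:Nat):Int) := by decide
lemma g3 : ∀ v : Fin 16, gmulB 3 ((v:Nat):Int) = mulA 3 ((v:Nat):Int) := by decide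
lemma m2fin : ∀ v : Fin 16, ∃ p : Fin 16, mulA 2 ((v:Nat):Int) = ((p:Nat):Int) := by decide
lemma m3fin : ∀ v : Fin 16, ∃ p : Fin 16, mulA 3 ((v:Nat):Int) = ((p:Nat):Int) := by decide

lemma x0 (y : Int) : PySem.Int.bxor 0 y = y := by
  rw [PySem.Int.bxor_comm]; simp

lemma L1 (x y z w : ℕ) :
    PySem.Int.bxor (PySem.Int.bxor (PySem.Int.bxor (↑x) (↑y)) (↑z)) (↑w)
      = PySem.Int.bxor (PySem.Int.bxor (PySem.Int.bxor (↑y) (↑z)) (↑x)) (↑w) := by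
  simp only [PySem.Int.bxor_natCast]; norm_cast; ac_rfl

lemma L2 (x y z w : ℕ) :
    PySem.Int.bxor (PySem.Int.bxor (PySem.Int.bxor (↑x) (↑y)) (↑z)) (↑w)
      = PySem.Int.bxor (PySem.Int.bxor (PySem.Int.bxor (↑z) (↑w)) (↑x)) (↑y) := by
  simp only [PySem.Int.bxor_natCast]; norm_cast; ac_rfl

lemma L3 (x y z w : ℕ) :
    PySem.Int.bxor (PySem.Int.bxor (PySem.Int.bxor (↑x) (↑y)) (↑z)) (↑w)
      = PySem.Int.bxor (PySem.Int.bxor (PySem.Int.bxor (↑w) (↑x)) (↑y)) (↑z) := by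
  simp only [PySem.Int.bxor_natCast]; norm_cast; ac_rfl

lemma lookup_fin (i : Int) : ∃ j : Fin 16, (PySem.List.pyGet? sboxA i).getD 0 = ((j:Nat):Int) := by
  cases h : PySem.List.pyGet? sboxA i with
  | none => exact ⟨0, rfl⟩
  | some v =>
    have hm := PySem.List.mem_of_pyGet?_eq_some _ h
    have hb : 0 ≤ v ∧ v < 16 := by fin_cases hm <;> omega
    refine ⟨⟨v.toNat, by omega⟩, ?_⟩
    simp only [Option.getD_some]
    omega

set_option maxHeartbeats 4000000 in
lemma assemble_eq : ∀ w0 w1 w2 w3 : Fin 16,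
    catA (catA ((w0:Nat):Int) ((w1:Nat):Int) 4) (catA ((w2:Nat):Int) ((w3:Nat):Int) 4) 8
      = PySem.Int.bor (PySem.Int.bor (PySem.Int.bor (((w0:Nat):Int) <<< (12:Nat)) (((w1:Nat):Int) <<< (8:Nat))) (((w2:Nat):Int) <<< (4:Nat))) ((w3:Nat):Int) := by
  decide

lemma final_assemble (z0 z1 z2 z3 : Int) :
    catA (catA ((PySem.List.pyGet? sboxA z0).getD 0) ((PySem.List.pyGet? sboxA z1).getD 0) 4)
         (catA ((PySem.List.pyGet? sboxA z2).getD 0) ((PySem.List.pyGet? sboxA z3).getD 0) 4) 8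
      = PySem.Int.bor (PySem.Int.bor (PySem.Int.bor ((PySem.List.pyGet? sboxA z0).getD 0 <<< (12:Nat)) ((PySem.List.pyGet? sboxA z1).getD 0 <<< (8:Nat))) ((PySem.List.pyGet? sboxA z2).getD 0 <<< (4:Nat))) ((PySem.List.pyGet? sboxA z3).getD 0) := by
  obtain ⟨w0, h0⟩ := lookup_fin z0
  obtain ⟨w1, h1⟩ := lookup_fin z1
  obtain ⟨w2, h2⟩ := lookup_fin z2
  obtain ⟨w3, h3⟩ := lookup_fin z3
  rw [h0, h1, h2, h3]
  exact assemble_eq w0 w1 w2 w3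

lemma core_eq (a b c d : Fin 16) :
    coreA ((a:Nat):Int) ((b:Nat):Int) ((c:Nat):Int) ((d:Nat):Int)
      = coreB ((a:Nat):Int) ((b:Nat):Int) ((c:Nat):Int) ((d:Nat):Int) := by
  obtain ⟨pa, hpa⟩ := m2fin a
  obtain ⟨pb, hpb⟩ := m2fin b
  obtain ⟨pc, hpc⟩ := m2fin c
  obtain ⟨pd, hpd⟩ := m2fin d
  obtain ⟨qa, hqa⟩ := m3fin a
  obtain ⟨qb, hqb⟩ := m3fin b
  obtain ⟨qc, hqc⟩ := m3fin c
  obtain ⟨qd, hqd⟩ := m3fin d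
  have hsb : sboxB = sboxA := rfl
  simp only [coreA, coreB, mrowsB, List.zip_cons_cons, List.zip_nil_right,
    List.map_cons, List.map_nil, List.foldl_cons, List.foldl_nil,
    List.getD_cons_zero, List.getD_cons_succ, g1, g2, g3, x0, hsb]
  rw [hpa, hpb, hpc, hpd, hqa, hqb, hqc, hqd]
  rw [L1 ↑a ↑pb ↑qc ↑d, L2 ↑a ↑b ↑pc ↑qd, L3 ↑qa ↑b ↑c ↑pd]
  exact final_assemble _ _ _ _

theorem F_spec : Claim_equal_F := by
  intro x _ hpre
  obtain ⟨h1, h2⟩ := hpre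
  unfold Spec_F
  rw [F_eq_coreA, Falt_eq_coreB]
  have shl8 : ((1:Int) <<< (8:Nat)) = 256 := by decide
  have h256 : (0:Int) < 256 := by norm_num
  have h16 : (0:Int) < 16 := by norm_num
  have hsb : sboxB = sboxA := rfl
  have ha : PySem.List.pyGet? sboxA (lhalfA (lhalfA x 8) 4)
      = PySem.List.pyGet? sboxB (PySem.Int.mod (x >>> (12:Nat)) 16) := by
    have hi : lhalfA (lhalfA x 8) 4 = x >>> (12:Nat) := by
      simp only [lhalfA, Int.shiftRight_eq_div_pow]
      norm_num
      omega
    have hb1 : -16 ≤ x >>> (12:Nat) ∧ x >>> (12:Nat) < 16 := by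
      rw [Int.shiftRight_eq_div_pow]
      norm_num
      omega
    rw [hi, wrap_lookup _ hb1.1 hb1.2, hsb]
  have hbq : PySem.List.pyGet? sboxA (rhalfA (lhalfA x 8) 4)
      = PySem.List.pyGet? sboxB (PySem.Int.mod (x >>> (8:Nat)) 16) := by
    simp only [rhalfA, lhalfA, hsb]
    rfl
  have hc : PySem.List.pyGet? sboxA (lhalfA (rhalfA x 8) 4)
      = PySem.List.pyGet? sboxB (PySem.Int.mod (x >>> (4:Nat)) 16) := by
    have hi : lhalfA (rhalfA x 8) 4 = PySem.Int.mod (x >>> (4:Nat)) 16 := by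
      simp only [lhalfA, rhalfA, shl8, PySem.Int.mod_eq_emod_of_pos h256,
        PySem.Int.mod_eq_emod_of_pos h16, Int.shiftRight_eq_div_pow]
      norm_num
      omega
    rw [hi, hsb]
  have hd : PySem.List.pyGet? sboxA (rhalfA (rhalfA x 8) 4)
      = PySem.List.pyGet? sboxB (PySem.Int.mod (x >>> (0:Nat)) 16) := by
    have hi : rhalfA (rhalfA x 8) 4 = PySem.Int.mod (x >>> (0:Nat)) 16 := by
      have shl4 : ((1:Int) <<< (4:Nat)) = 16 := by decide
      simp only [rhalfA, shl8, shl4, PySem.Int.mod_eq_emod_of_pos h256,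
        PySem.Int.mod_eq_emod_of_pos h16, Int.shiftRight_eq_div_pow]
      norm_num
    rw [hi, hsb]
  rw [ha, hbq, hc, hd, hsb]
  obtain ⟨ja, ea⟩ := lookup_fin (PySem.Int.mod (x >>> (12:Nat)) 16)
  obtain ⟨jb, eb⟩ := lookup_fin (PySem.Int.mod (x >>> (8:Nat)) 16)
  obtain ⟨jc, ec⟩ := lookup_fin (PySem.Int.mod (x >>> (4:Nat)) 16)
  obtain ⟨jd, ed⟩ := lookup_fin (PySem.Int.mod (x >>> (0:Nat)) 16)
  rw [ea, eb, ec, ed]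
  exact core_eq ja jb jc jd

theorem F_raises : Claim_raises_F := by
  unfold Claim_raises_F
  exact ⟨by intro x _ hr hp; unfold Raises_F at hr; unfold Pre_F at hp; omega, by decide⟩

theorem F_raises_witness_ok : F_alt pvRaiseWitness_F = pvRaiseWitnessOut_F := F_raises.2.2.2
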